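-- pv_equiv track=rewrite | github.com/KonstantyFlint/vinaigrette | attack/guess_key_length.py | get_coincidence_counts
-- ===== SOURCE A (Python) =====
-- from collections import deque
--
-- def get_coincidence_counts(cipher: str, max_key_length: int):
--     base = list(cipher)
--     shifted = deque(base)
--     counts = []
--     for offset in range(1, max_key_length + 1):
--         shifted.append(shifted.popleft())
--         count = sum(1 if a == b else 0 for a, b in zip(base, shifted))
--         counts.append(count)
--     return counts
-- ===== SOURCE B (Python) =====
-- def get_coincidence_counts(cipher: str, max_key_length: int):
--     n = len(cipher)
--     if n == 0:
--         return [0] * max_key_length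
--     res = [sum(1 for i in range(n) if cipher[i] == cipher[(i + r) % n]) for r in range(n)]
--     return [res[k % n] for k in range(1, max_key_length + 1)]
-- ===== Notes on version B (the rewrite author's own statement) =====
-- stated objective: alternative
-- what changed: A rotates a deque by one position per offset and re-scans the zipped pair; B computes a table of per-residue coincidence counts once via modular indexing and answers each offset by a table lookup res[k % n], reusing counts when max_key_length exceeds the text length.
import Mathlib
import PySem

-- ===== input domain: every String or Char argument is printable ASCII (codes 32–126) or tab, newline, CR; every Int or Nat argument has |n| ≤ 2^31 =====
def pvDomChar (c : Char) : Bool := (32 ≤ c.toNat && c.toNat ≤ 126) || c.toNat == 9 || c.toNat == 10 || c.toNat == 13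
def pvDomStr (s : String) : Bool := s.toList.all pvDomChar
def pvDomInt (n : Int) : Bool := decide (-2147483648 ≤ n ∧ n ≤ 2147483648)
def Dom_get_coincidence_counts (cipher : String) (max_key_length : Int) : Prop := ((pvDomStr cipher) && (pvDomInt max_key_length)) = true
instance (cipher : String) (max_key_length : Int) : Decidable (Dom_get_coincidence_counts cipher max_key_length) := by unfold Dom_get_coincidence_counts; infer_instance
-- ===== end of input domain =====

-- B replaces A's incremental deque rotation per offset by a table of per-residue
-- coincidence counts indexed with modular arithmetic (alternative decomposition;
-- reuses counts across offsets when max_key_length exceeds the text length).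


-- ===== PORT A =====
-- one iteration of A's loop body: rotate the deque by one, count matching pairs, append
def stepA (base : List Char) (st : List Char × List Int) (_offset : Int) : List Char × List Int :=
  let shifted :=
    match st.1 with
    | [] => []            -- Python: deque.popleft() raises IndexError here (excluded by Pre_)
    | h :: t => t ++ [h]  -- shifted.append(shifted.popleft())
  let count := (base.zip shifted).foldl (fun acc p => acc + (if p.1 == p.2 then (1 : Int) else 0)) 0
  (shifted, st.2 ++ [count])

def get_coincidence_counts (cipher : String) (max_key_length : Int) : List Int :=
  let base := cipher.toList
  ((PySem.List.pyRange 1 (max_key_length + 1) 1).foldl (stepA base) (base, [])).2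

-- ===== PORT B =====
-- sum(1 for i in range(n) if cipher[i] == cipher[(i + r) % n])
def resCount (cs : List Char) (r : Int) : Int :=
  (PySem.List.pyRange 0 (PySem.List.len cs) 1).foldl
    (fun acc i =>
      if PySem.List.pyGetD cs i ' ' == PySem.List.pyGetD cs (PySem.Int.mod (i + r) (PySem.List.len cs)) ' '
      then acc + 1 else acc) 0

def get_coincidence_counts_alt (cipher : String) (max_key_length : Int) : List Int :=
  let cs := cipher.toList
  let n := PySem.List.len cs
  if n == 0 then List.replicate max_key_length.toNat 0    -- [0] * max_key_length
  else
    let res := (PySem.List.pyRange 0 n 1).map (resCount cs)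
    (PySem.List.pyRange 1 (max_key_length + 1) 1).map (fun k => PySem.List.pyGetD res (PySem.Int.mod k n) 0)

-- ===== PRECONDITION & SPEC =====
-- Pre_ excludes only the empty cipher with max_key_length >= 1, on which A's deque.popleft() raises IndexError.
def Pre_get_coincidence_counts (cipher : String) (max_key_length : Int) : Prop :=
  cipher.toList ≠ [] ∨ max_key_length < 1
instance (cipher : String) (max_key_length : Int) : Decidable (Pre_get_coincidence_counts cipher max_key_length) := by unfold Pre_get_coincidence_counts; infer_instance

def pvWitness_get_coincidence_counts : String × Int := ("abab", 3)

def Spec_get_coincidence_counts (cipher : String) (max_key_length : Int) (out : List Int) : Prop := out = get_coincidence_counts_alt cipher max_key_length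
instance (cipher : String) (max_key_length : Int) (out : List Int) : Decidable (Spec_get_coincidence_counts cipher max_key_length out) := by unfold Spec_get_coincidence_counts; infer_instance

-- ===== CLAIM (what is proved, stated in full; the proofs are below) =====
def Claim_equal_get_coincidence_counts : Prop := ∀ (cipher : String) (max_key_length : Int), Dom_get_coincidence_counts cipher max_key_length → Pre_get_coincidence_counts cipher max_key_length → Spec_get_coincidence_counts cipher max_key_length (get_coincidence_counts cipher max_key_length)
-- ===== LEMMAS AND PROOFS =====

-- A's zip-count of the deque state; the common "canonical" count both programs reduce to
def cntA (base l : List Char) : Int :=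
  (base.zip l).foldl (fun acc p => acc + (if p.1 == p.2 then (1 : Int) else 0)) 0

def scount (base : List Char) (t : Nat) : Int :=
  ((List.range base.length).map
    (fun i => if base.getD i ' ' == base.getD ((i + t) % base.length) ' ' then (1 : Int) else 0)).sum

theorem cntA_rotate (base : List Char) (hb : base ≠ []) (t : Nat) :
    cntA base (base.rotate t) = scount base t := by
  have hn : 0 < base.length := List.length_pos_iff.mpr hb
  unfold cntA scount
  rw [PySem.List.foldl_add, zero_add]
  congr 1
  apply List.ext_getElem
  · simp
  · intro i h1 h2
    simp only [List.getElem_map, List.getElem_zip, List.getElem_range]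
    have hi : i < base.length := by simpa using h2
    rw [List.getElem_rotate]
    rw [List.getD_eq_getElem base ' ' hi, List.getD_eq_getElem base ' ' (Nat.mod_lt _ hn)]

theorem scount_mod (base : List Char) (t : Nat) :
    scount base t = scount base (t % base.length) := by
  unfold scount
  congr 1
  apply List.map_congr_left
  intro i _
  have : (i + t) % base.length = (i + t % base.length) % base.length := by
    conv_lhs => rw [Nat.add_mod]
    conv_rhs => rw [Nat.add_mod, Nat.mod_mod_of_dvd _ dvd_rfl]
  rw [this]

theorem resCount_eq (base : List Char) (r : Nat) :
    resCount base (r : Int) = scount base r := by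
  unfold resCount
  rw [PySem.List.len_eq, PySem.List.pyRange_zero_nat, List.foldl_map]
  simp only [PySem.List.pyGetD_natCast, ← Nat.cast_add, PySem.Int.mod_natCast]
  rw [PySem.List.foldl_count_if]
  unfold scount
  rw [PySem.List.sum_map_ite_one_zero]
  simp

theorem foldlA_invariant (base : List Char) (L : List Int) :
    ∀ (s : List Char) (acc : List Int), s ≠ [] →
      L.foldl (stepA base) (s, acc)
        = (s.rotate L.length,
           acc ++ (List.range L.length).map (fun j => cntA base (s.rotate (j + 1)))) := by
  induction L with
  | nil => intro s acc _; simp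
  | cons a L ih =>
    intro s acc hs
    obtain ⟨h, t, rfl⟩ := List.exists_cons_of_ne_nil hs
    have hstep : stepA base (h :: t, acc) a = ((h :: t).rotate 1, acc ++ [cntA base ((h :: t).rotate 1)]) := by
      simp [stepA, cntA, List.rotate_cons_succ]
    rw [List.foldl_cons, hstep, ih ((h :: t).rotate 1) _ (by simp)]
    apply Prod.ext
    · simp
    · simp only [List.length_cons, List.range_succ_eq_map, List.map_cons, List.map_map,
        List.append_assoc, List.singleton_append]
      congr 2
      apply List.map_congr_left
      intro j _
      simp only [Function.comp]
      rw [List.rotate_rotate]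
      have he : 1 + (j + 1) = j.succ + 1 := by omega
      rw [he]

-- ===== VERDICT (by name: the statement is the Claim_ definition above) =====
theorem get_coincidence_counts_spec : Claim_equal_get_coincidence_counts := by
  intro cipher m _ hpre
  unfold Spec_get_coincidence_counts get_coincidence_counts get_coincidence_counts_alt
  by_cases hb : cipher.toList = []
  · -- empty cipher: Pre_ forces m < 1, both sides are []
    have hm : m < 1 := by
      rcases hpre with h | h
      · exact absurd hb h
      · exact h
    have hm0 : m.toNat = 0 := by omega
    simp only [hb]
    rw [PySem.List.pyRange_one_eq_nil (by omega)]
    simp [hm0]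
  · -- nonempty cipher
    have hn : 0 < cipher.toList.length := List.length_pos_iff.mpr hb
    simp only [PySem.List.len_eq]
    have hne : ¬(((cipher.toList.length : Int) == 0) = true) := by simpa using hb
    rw [if_neg hne]
    rw [foldlA_invariant cipher.toList _ cipher.toList [] hb]
    simp only [List.nil_append, PySem.List.length_pyRange_one]
    have hM : (m + 1 - 1).toNat = m.toNat := by omega
    rw [hM, PySem.List.pyRange_one 1 (m + 1), hM, List.map_map]
    apply List.map_congr_left
    intro j _
    simp only [Function.comp]
    rw [cntA_rotate cipher.toList hb (j + 1), scount_mod]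
    have h1 : (1 : Int) + (j : Int) = ((j + 1 : Nat) : Int) := by push_cast; ring
    rw [h1, PySem.Int.mod_natCast]
    rw [PySem.List.pyGetD_map_pyRange (resCount cipher.toList) cipher.toList.length
      ((j + 1) % cipher.toList.length) 0 (Nat.mod_lt _ hn)]
    rw [resCount_eq]
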